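-- pv_equiv track=rewrite | github.com/Diomandeee/nko-brain-scanner | asr/rebridge_djoko.py | _fallback_bridge
-- ===== SOURCE A (Python) =====
-- FALLBACK_MAP = {
--     # Vowels
--     "a": "\u07ca", "e": "\u07cd", "i": "\u07cc", "o": "\u07cb",
--     "u": "\u07ce", "\u0254": "\u07cf", "\u025b": "\u07d0",
--     "\u0259": "\u07d0",
--     # Consonants
--     "b": "\u07d3", "d": "\u07d8", "f": "\u07dd", "g": "\u07dc",
--     "h": "\u07e4", "k": "\u07de", "l": "\u07df", "m": "\u07e1",
--     "n": "\u07e3", "p": "\u07d4", "r": "\u07d9", "s": "\u07db",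
--     "t": "\u07d5", "w": "\u07e5", "z": "\u07db", "v": "\u07dd",
-- }
--
-- FALLBACK_DIGRAPHS = {
--     "ny": "\u07e2",   # Nya
--     "ng": "\u07a7",   # Nga -- actually U+07D2? Let's use the correct one
--     "gb": "\u07dc",   # Gba
--     "ch": "\u07d7",   # Cha
--     "dj": "\u07d6",   # Ja
--     "sh": "\u07db",   # Sha -> Sa
-- }
--
-- def _fallback_bridge(text: str) -> str:
--     """Fallback Latin->N'Ko bridge when nko.transliterate is not available."""
--     import unicodedata
--     text = unicodedata.normalize("NFD", text.lower())
--     parts = []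
--     i = 0
--     while i < len(text):
--         if text[i] == " ":
--             parts.append(" ")
--             i += 1
--             continue
--         # Try digraphs first
--         matched = False
--         for dg, nko_ch in FALLBACK_DIGRAPHS.items():
--             if text[i:i+len(dg)] == dg:
--                 parts.append(nko_ch)
--                 i += len(dg)
--                 matched = True
--                 break
--         if matched:
--             continue
--         ch = text[i]
--         if ch in FALLBACK_MAP:
--             parts.append(FALLBACK_MAP[ch])
--         elif ch == "j":
--             parts.append("\u07d6")  # Ja
--         elif ch == "c":
--             parts.append("\u07d7")  # Cha
--         elif ch == "y":
--             parts.append("\u07e6")  # Ya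
--         elif ch == "q":
--             parts.append("\u07de")  # Ka
--         elif ch == "x":
--             parts.append("\u07de\u07db")  # ks -> Ka+Sa
--         # Skip combining diacritics (tone marks) in fallback
--         elif 0x0300 <= ord(ch) <= 0x036F:
--             pass
--         else:
--             pass  # drop unmapped
--         i += 1
--     return "".join(parts)
-- ===== SOURCE B (Python) =====
-- FALLBACK_MAP = {
--     "a": "\u07ca", "e": "\u07cd", "i": "\u07cc", "o": "\u07cb",
--     "u": "\u07ce", "\u0254": "\u07cf", "\u025b": "\u07d0",
--     "\u0259": "\u07d0",
--     "b": "\u07d3", "d": "\u07d8", "f": "\u07dd", "g": "\u07dc",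
--     "h": "\u07e4", "k": "\u07de", "l": "\u07df", "m": "\u07e1",
--     "n": "\u07e3", "p": "\u07d4", "r": "\u07d9", "s": "\u07db",
--     "t": "\u07d5", "w": "\u07e5", "z": "\u07db", "v": "\u07dd",
-- }
--
-- FALLBACK_DIGRAPHS = {
--     "ny": "\u07e2", "ng": "\u07a7", "gb": "\u07dc",
--     "ch": "\u07d7", "dj": "\u07d6", "sh": "\u07db",
-- }
--
-- _SINGLE = {**FALLBACK_MAP,
--            "j": "\u07d6", "c": "\u07d7", "y": "\u07e6",
--            "q": "\u07de", "x": "\u07de\u07db", " ": " "}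
--
-- _STARTERS = {dg[0] for dg in FALLBACK_DIGRAPHS}
--
--
-- def _fallback_bridge(text: str) -> str:
--     """Streaming one-state automaton: hold back a possible digraph starter."""
--     import unicodedata
--     t = unicodedata.normalize("NFD", text.lower())
--     out = []
--     pend = ""
--     for ch in t:
--         if pend:
--             if pend + ch in FALLBACK_DIGRAPHS:
--                 out.append(FALLBACK_DIGRAPHS[pend + ch])
--                 pend = ""
--                 continue
--             out.append(_SINGLE.get(pend, ""))
--             pend = ""
--         if ch in _STARTERS:
--             pend = ch
--         else:
--             out.append(_SINGLE.get(ch, ""))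
--     if pend:
--         out.append(_SINGLE.get(pend, ""))
--     return "".join(out)
-- ===== Notes on version B (the rewrite author's own statement) =====
-- stated objective: faster
-- what changed: Replaces A's index-based while-loop that slices the text and scans the digraph dict at every position with a single streaming pass: a one-state automaton that holds back a possible digraph-starting character and resolves it against one combined single-character map on the next character.
import Mathlib
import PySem

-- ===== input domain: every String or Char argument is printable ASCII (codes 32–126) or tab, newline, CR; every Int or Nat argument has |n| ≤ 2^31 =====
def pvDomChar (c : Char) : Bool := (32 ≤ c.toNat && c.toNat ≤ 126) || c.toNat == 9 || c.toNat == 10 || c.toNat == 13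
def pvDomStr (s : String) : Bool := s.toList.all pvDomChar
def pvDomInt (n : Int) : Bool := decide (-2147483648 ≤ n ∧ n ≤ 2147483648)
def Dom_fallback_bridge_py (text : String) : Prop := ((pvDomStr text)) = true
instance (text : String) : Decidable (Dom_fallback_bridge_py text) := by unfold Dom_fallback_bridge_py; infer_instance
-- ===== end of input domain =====

-- B replaces A's index-and-slice scan (inner loop over the digraph dict at every position)
-- by a streaming one-state automaton that holds back a possible digraph starter; objective: faster (measured).
-- unicodedata.normalize("NFD", ·) is the identity on the ASCII domain, so both ports apply only .lower().

-- ===== PORT A =====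
def fmapA : PySem.Dict Char String := PySem.Dict.mk [('a', "ߊ"), ('e', "ߍ"), ('i', "ߌ"), ('o', "ߋ"), ('u', "ߎ"), ('ɔ', "ߏ"), ('ɛ', "ߐ"), ('ə', "ߐ"), ('b', "ߓ"), ('d', "ߘ"), ('f', "ߝ"), ('g', "ߜ"), ('h', "ߤ"), ('k', "ߞ"), ('l', "ߟ"), ('m', "ߡ"), ('n', "ߣ"), ('p', "ߔ"), ('r', "ߙ"), ('s', "ߛ"), ('t', "ߕ"), ('w', "ߥ"), ('z', "ߛ"), ('v', "ߝ")]

def digraphsA : List (String × String) := [("ny", "ߢ"), ("ng", "ާ"), ("gb", "ߜ"), ("ch", "ߗ"), ("dj", "ߖ"), ("sh", "ߛ")]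

-- the while-loop of A: recursion on the remaining suffix of the text
def goA : List Char → List String
  | [] => []
  | c :: rest =>
    if c = ' ' then " " :: goA rest
    else
      match digraphsA.find? (fun p => p.1.toList.isPrefixOf (c :: rest)) with
      | some (dg, nk) => nk :: goA (List.drop (dg.toList.length - 1) rest)
      | none =>
        match fmapA.get? c with
        | some v => v :: goA rest
        | none =>
          if c = 'j' then "ߖ" :: goA rest
          else if c = 'c' then "ߗ" :: goA rest
          else if c = 'y' then "ߦ" :: goA rest
          else if c = 'q' then "ߞ" :: goA rest
          else if c = 'x' then "ߞߛ" :: goA rest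
          else if 0x300 ≤ c.toNat ∧ c.toNat ≤ 0x36F then goA rest
          else goA rest
termination_by l => l.length
decreasing_by
  all_goals simp [List.length_drop]

def fallback_bridge_py (text : String) : String :=
  PySem.Str.join "" (goA (PySem.Str.lower text).toList)

-- ===== PORT B =====
def digB : PySem.Dict String String := PySem.Dict.mk [("ny", "ߢ"), ("ng", "ާ"), ("gb", "ߜ"), ("ch", "ߗ"), ("dj", "ߖ"), ("sh", "ߛ")]

def singleB : PySem.Dict Char String := PySem.Dict.mk [('a', "ߊ"), ('e', "ߍ"), ('i', "ߌ"), ('o', "ߋ"), ('u', "ߎ"), ('ɔ', "ߏ"), ('ɛ', "ߐ"), ('ə', "ߐ"), ('b', "ߓ"), ('d', "ߘ"), ('f', "ߝ"), ('g', "ߜ"), ('h', "ߤ"), ('k', "ߞ"), ('l', "ߟ"), ('m', "ߡ"), ('n', "ߣ"), ('p', "ߔ"), ('r', "ߙ"), ('s', "ߛ"), ('t', "ߕ"), ('w', "ߥ"), ('z', "ߛ"), ('v', "ߝ"), ('j', "ߖ"), ('c', "ߗ"), ('y', "ߦ"), ('q', "ߞ"), ('x', "ߞߛ"), (' ', " 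")]

def startersB : PySem.Set Char := PySem.Set.ofList (digB.keys.map (fun k => k.toList.headD ' '))

-- one step of the for-loop: state = (held-back digraph starter, output parts)
def stepB (st : Option Char × List String) (ch : Char) : Option Char × List String :=
  match st.1 with
  | some p =>
    match digB.get? (String.mk [p, ch]) with
    | some nk => (none, st.2 ++ [nk])
    | none =>
      let out := st.2 ++ [singleB.getD p ""]
      if PySem.Set.contains startersB ch then (some ch, out)
      else (none, out ++ [singleB.getD ch ""])
  | none =>
    if PySem.Set.contains startersB ch then (some ch, st.2)
    else (none, st.2 ++ [singleB.getD ch ""])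

def fallback_bridge_py_alt (text : String) : String :=
  PySem.Str.join ""
    (match ((PySem.Str.lower text).toList).foldl stepB (none, []) with
      | (some p, out) => out ++ [singleB.getD p ""]
      | (none, out) => out)

-- ===== PRECONDITION & SPEC =====
def Spec_fallback_bridge_py (text : String) (out : String) : Prop := out = fallback_bridge_py_alt text
instance (text : String) (out : String) : Decidable (Spec_fallback_bridge_py text out) := by unfold Spec_fallback_bridge_py; infer_instance

-- ===== CLAIM (what is proved, stated in full; the proofs are below) =====
def Claim_equal_fallback_bridge_py : Prop := ∀ (text : String), Dom_fallback_bridge_py text → Spec_fallback_bridge_py text (fallback_bridge_py text)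

-- ===== LEMMAS AND PROOFS =====

-- the tail of B's loop, written as a structural recursion for the proof
def runB : Option Char → List Char → List String
  | none, [] => []
  | some p, [] => [singleB.getD p ""]
  | none, ch :: rest =>
    if PySem.Set.contains startersB ch then runB (some ch) rest
    else singleB.getD ch "" :: runB none rest
  | some p, ch :: rest =>
    match digB.get? (String.mk [p, ch]) with
    | some nk => nk :: runB none rest
    | none =>
      singleB.getD p "" ::
        (if PySem.Set.contains startersB ch then runB (some ch) rest
         else singleB.getD ch "" :: runB none rest)

lemma runB_some_some {p ch : Char} {rest : List Char} {nk : String}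
    (h : digB.get? (String.mk [p, ch]) = some nk) :
    runB (some p) (ch :: rest) = nk :: runB none rest := by
  rw [runB, h]

lemma runB_some_none {p ch : Char} {rest : List Char}
    (h : digB.get? (String.mk [p, ch]) = none) :
    runB (some p) (ch :: rest) =
      singleB.getD p "" ::
        (if PySem.Set.contains startersB ch then runB (some ch) rest
         else singleB.getD ch "" :: runB none rest) := by
  rw [runB, h]

lemma foldl_stepB (l : List Char) : ∀ (pend : Option Char) (out : List String),
    (match l.foldl stepB (pend, out) with
      | (some p, o) => o ++ [singleB.getD p ""]
      | (none, o) => o)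
    = out ++ runB pend l := by
  induction l with
  | nil => intro pend out; cases pend <;> simp [runB]
  | cons ch rest ih =>
    intro pend out
    cases pend with
    | none =>
      by_cases h : ch ∈ startersB
      · simp [stepB, h, runB, ih]
      · simp [stepB, h, runB, ih]
    | some p =>
      cases hdg : digB.get? (String.mk [p, ch]) with
      | some nk => simp [stepB, hdg, runB, ih]
      | none =>
        by_cases h : ch ∈ startersB
        · simp [stepB, hdg, h, runB, ih]
        · simp [stepB, hdg, h, runB, ih]

-- joined characters of a list of parts
def J (parts : List String) : List Char := (parts.map String.toList).flatten

lemma J_cons (s : String) (l : List String) : J (s :: l) = s.toList ++ J l := by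
  simp [J]

-- A's single-character elif chain computes the same string B's combined dict looks up
lemma single_agree (c : Char) :
    singleB.getD c ""
      = (match fmapA.get? c with
          | some v => v
          | none =>
            if c = 'j' then "ߖ"
            else if c = 'c' then "ߗ"
            else if c = 'y' then "ߦ"
            else if c = 'q' then "ߞ"
            else if c = 'x' then "ߞߛ"
            else if c = ' ' then " "
            else "") := by
  by_cases hm : c ∈ ['a', 'e', 'i', 'o', 'u', 'ɔ', 'ɛ', 'ə', 'b', 'd', 'f', 'g', 'h', 'k', 'l', 'm', 'n', 'p', 'r', 's', 't', 'w', 'z', 'v', 'j', 'c', 'y', 'q', 'x', ' ']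
  · fin_cases hm <;> decide
  · simp only [List.mem_cons, List.not_mem_nil, or_false, not_or] at hm
    obtain ⟨n1, n2, n3, n4, n5, n6, n7, n8, n9, n10, n11, n12, n13, n14, n15, n16, n17, n18, n19, n20, n21, n22, n23, n24, n25, n26, n27, n28, n29, n30⟩ := hm
    have g1 : (('a' == c) = false) := beq_eq_false_iff_ne.mpr (Ne.symm n1)
    have g2 : (('e' == c) = false) := beq_eq_false_iff_ne.mpr (Ne.symm n2)
    have g3 : (('i' == c) = false) := beq_eq_false_iff_ne.mpr (Ne.symm n3)
    have g4 : (('o' == c) = false) := beq_eq_false_iff_ne.mpr (Ne.symm n4)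
    have g5 : (('u' == c) = false) := beq_eq_false_iff_ne.mpr (Ne.symm n5)
    have g6 : (('ɔ' == c) = false) := beq_eq_false_iff_ne.mpr (Ne.symm n6)
    have g7 : (('ɛ' == c) = false) := beq_eq_false_iff_ne.mpr (Ne.symm n7)
    have g8 : (('ə' == c) = false) := beq_eq_false_iff_ne.mpr (Ne.symm n8)
    have g9 : (('b' == c) = false) := beq_eq_false_iff_ne.mpr (Ne.symm n9)
    have g10 : (('d' == c) = false) := beq_eq_false_iff_ne.mpr (Ne.symm n10)
    have g11 : (('f' == c) = false) := beq_eq_false_iff_ne.mpr (Ne.symm n11)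
    have g12 : (('g' == c) = false) := beq_eq_false_iff_ne.mpr (Ne.symm n12)
    have g13 : (('h' == c) = false) := beq_eq_false_iff_ne.mpr (Ne.symm n13)
    have g14 : (('k' == c) = false) := beq_eq_false_iff_ne.mpr (Ne.symm n14)
    have g15 : (('l' == c) = false) := beq_eq_false_iff_ne.mpr (Ne.symm n15)
    have g16 : (('m' == c) = false) := beq_eq_false_iff_ne.mpr (Ne.symm n16)
    have g17 : (('n' == c) = false) := beq_eq_false_iff_ne.mpr (Ne.symm n17)
    have g18 : (('p' == c) = false) := beq_eq_false_iff_ne.mpr (Ne.symm n18)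
    have g19 : (('r' == c) = false) := beq_eq_false_iff_ne.mpr (Ne.symm n19)
    have g20 : (('s' == c) = false) := beq_eq_false_iff_ne.mpr (Ne.symm n20)
    have g21 : (('t' == c) = false) := beq_eq_false_iff_ne.mpr (Ne.symm n21)
    have g22 : (('w' == c) = false) := beq_eq_false_iff_ne.mpr (Ne.symm n22)
    have g23 : (('z' == c) = false) := beq_eq_false_iff_ne.mpr (Ne.symm n23)
    have g24 : (('v' == c) = false) := beq_eq_false_iff_ne.mpr (Ne.symm n24)
    have g25 : (('j' == c) = false) := beq_eq_false_iff_ne.mpr (Ne.symm n25)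
    have g26 : (('c' == c) = false) := beq_eq_false_iff_ne.mpr (Ne.symm n26)
    have g27 : (('y' == c) = false) := beq_eq_false_iff_ne.mpr (Ne.symm n27)
    have g28 : (('q' == c) = false) := beq_eq_false_iff_ne.mpr (Ne.symm n28)
    have g29 : (('x' == c) = false) := beq_eq_false_iff_ne.mpr (Ne.symm n29)
    have g30 : ((' ' == c) = false) := beq_eq_false_iff_ne.mpr (Ne.symm n30)
    simp [singleB, fmapA, PySem.Dict.getD, PySem.Dict.get?, List.find?,
      g1, g2, g3, g4, g5, g6, g7, g8, g9, g10, g11, g12, g13, g14, g15, g16, g17, g18, g19, g20,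
      g21, g22, g23, g24, g25, g26, g27, g28, g29, g30, n25, n26, n27, n28, n29, n30]

-- membership in B's starter set
lemma starters_iff (c : Char) :
    PySem.Set.contains startersB c = true ↔ (c = 'n' ∨ c = 'g' ∨ c = 'c' ∨ c = 'd' ∨ c = 's') := by
  have hs : startersB = ['n', 'g', 'c', 'd', 's'] := by decide
  rw [PySem.Set.contains_iff, hs]
  simp only [List.mem_cons, List.not_mem_nil, or_false]

-- no digraph matches at a non-starter character
lemma dig_find_none (c : Char) (hc : PySem.Set.contains startersB c = false) (l : List Char) :
    digraphsA.find? (fun p => p.1.toList.isPrefixOf (c :: l)) = none := by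
  have h : ¬ (c = 'n' ∨ c = 'g' ∨ c = 'c' ∨ c = 'd' ∨ c = 's') := by
    intro h
    rw [← starters_iff] at h
    rw [h] at hc
    cases hc
  simp only [not_or] at h
  obtain ⟨h1, h2, h3, h4, h5⟩ := h
  have g1 : (('n' == c) = false) := beq_eq_false_iff_ne.mpr (Ne.symm h1)
  have g2 : (('g' == c) = false) := beq_eq_false_iff_ne.mpr (Ne.symm h2)
  have g3 : (('c' == c) = false) := beq_eq_false_iff_ne.mpr (Ne.symm h3)
  have g4 : (('d' == c) = false) := beq_eq_false_iff_ne.mpr (Ne.symm h4)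
  have g5 : (('s' == c) = false) := beq_eq_false_iff_ne.mpr (Ne.symm h5)
  simp [digraphsA, List.find?, List.isPrefixOf, g1, g2, g3, g4, g5]

-- the main invariant, both states at once
lemma toList_mk (l : List Char) : (String.mk l).toList = l := Eq.symm (String.ofList_eq.mp rfl)

lemma digB_get (p ch : Char) :
    digB.get? (String.mk [p, ch]) =
      if p = 'n' ∧ ch = 'y' then some "ߢ"
      else if p = 'n' ∧ ch = 'g' then some "ާ"
      else if p = 'g' ∧ ch = 'b' then some "ߜ"
      else if p = 'c' ∧ ch = 'h' then some "ߗ"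
      else if p = 'd' ∧ ch = 'j' then some "ߖ"
      else if p = 's' ∧ ch = 'h' then some "ߛ"
      else none := by
  by_cases c1 : p = 'n' ∧ ch = 'y'
  · obtain ⟨h1, h2⟩ := c1; subst h1; subst h2; decide
  by_cases c2 : p = 'n' ∧ ch = 'g'
  · obtain ⟨h1, h2⟩ := c2; subst h1; subst h2; decide
  by_cases c3 : p = 'g' ∧ ch = 'b'
  · obtain ⟨h1, h2⟩ := c3; subst h1; subst h2; decide
  by_cases c4 : p = 'c' ∧ ch = 'h'
  · obtain ⟨h1, h2⟩ := c4; subst h1; subst h2; decide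
  by_cases c5 : p = 'd' ∧ ch = 'j'
  · obtain ⟨h1, h2⟩ := c5; subst h1; subst h2; decide
  by_cases c6 : p = 's' ∧ ch = 'h'
  · obtain ⟨h1, h2⟩ := c6; subst h1; subst h2; decide
  have g : ∀ (a b : Char) (s : String), s.toList = [a, b] → ¬ (p = a ∧ ch = b) →
      ((s == String.mk [p, ch]) = false) := by
    intro a b s hs hne
    rw [beq_eq_false_iff_ne]
    intro he
    apply hne
    have h2 := congrArg String.toList he
    rw [hs, toList_mk] at h2
    simp only [List.cons.injEq, and_true] at h2
    obtain ⟨ha, hb⟩ := h2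
    exact ⟨ha.symm, hb.symm⟩
  simp only [digB, PySem.Dict.get?_mk_cons, PySem.Dict.get?, List.find?,
    g 'n' 'y' "ny" (by decide) c1, g 'n' 'g' "ng" (by decide) c2,
    g 'g' 'b' "gb" (by decide) c3, g 'c' 'h' "ch" (by decide) c4,
    g 'd' 'j' "dj" (by decide) c5, g 's' 'h' "sh" (by decide) c6]
  simp [c1, c2, c3, c4, c5, c6]

set_option maxHeartbeats 2000000 in
lemma run_eq_goA (l : List Char) :
    J (runB none l) = J (goA l)
    ∧ (∀ p, PySem.Set.contains startersB p = true → J (runB (some p) l) = J (goA (p :: l))) := by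
  induction l with
  | nil =>
    refine ⟨by simp [runB, goA, J], fun p hp => ?_⟩
    rw [starters_iff] at hp
    rcases hp with h | h | h | h | h <;> subst h <;>
      · rw [goA]
        simp [runB, digraphsA, List.find?, List.isPrefixOf, J, J_cons,
          show goA [] = [] from by rw [goA],
          show fmapA.get? 'n' = some "ߣ" from by decide,
          show fmapA.get? 'g' = some "ߜ" from by decide,
          show fmapA.get? 'c' = none from by decide,
          show fmapA.get? 'd' = some "ߘ" from by decide,
          show fmapA.get? 's' = some "ߛ" from by decide,
          show singleB.getD 'n' "" = "ߣ" from by decide,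
          show singleB.getD 'g' "" = "ߜ" from by decide,
          show singleB.getD 'c' "" = "ߗ" from by decide,
          show singleB.getD 'd' "" = "ߘ" from by decide,
          show singleB.getD 's' "" = "ߛ" from by decide]
  | cons ch rest ih =>
    obtain ⟨ihN, ihS⟩ := ih
    have hN : J (runB none (ch :: rest)) = J (goA (ch :: rest)) := by
      by_cases hs : PySem.Set.contains startersB ch
      · rw [runB]; simp only [hs, if_true]
        exact ihS ch hs
      · rw [runB]; simp only [hs, if_false, Bool.false_eq_true]
        rw [goA, dig_find_none ch (by simpa using hs) rest]
        by_cases hsp : ch = ' '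
        · subst hsp
          simp [J_cons, ihN, show singleB.getD ' ' "" = " " from by decide,
            show (" " : String).toList = [' '] from by decide]
        · simp only [hsp, if_false]
          rw [J_cons, single_agree ch, ihN]
          have hcc : ¬ ch = 'c' := by
            intro h; subst h; rw [starters_iff] at hs; exact hs (by tauto)
          cases hf : fmapA.get? ch with
          | some v => simp [hf, J_cons]
          | none =>
            simp only [hf]
            split_ifs with h1 h2 h3 h4 h5 <;>
              first
                | (exfalso; first | exact hcc h2 | (subst h1; rw [starters_iff] at hs; exact hs (by tauto)))
                | (simp [J_cons, hsp] <;> subst_vars <;> decide)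
                | (subst_vars
                   simp [J_cons, show ("ߖ" : String).toList = ['ߖ'] from by decide,
                     show ("ߦ" : String).toList = ['ߦ'] from by decide,
                     show ("ߞ" : String).toList = ['ߞ'] from by decide,
                     show ("ߞߛ" : String).toList = ['ߞ', 'ߛ'] from by decide])
                | simp [J_cons, hsp]
    refine ⟨hN, fun p hp => ?_⟩
    have hpsp : ¬ p = ' ' := by
      intro h; subst h; rw [starters_iff] at hp; rcases hp with h | h | h | h | h <;> simp at h
    by_cases c1 : p = 'n' ∧ ch = 'y'
    · obtain ⟨h1, h2⟩ := c1; subst h1; subst h2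
      rw [runB_some_some (show digB.get? (String.mk ['n', 'y']) = some "ߢ" from by decide), goA]
      simp [digraphsA, List.find?, List.isPrefixOf, J_cons, ihN,
        show ("ߢ" : String).toList = ['ߢ'] from by decide,
        show ("ny" : String).toList = ['n', 'y'] from by decide]
    by_cases c2 : p = 'n' ∧ ch = 'g'
    · obtain ⟨h1, h2⟩ := c2; subst h1; subst h2
      rw [runB_some_some (show digB.get? (String.mk ['n', 'g']) = some "ާ" from by decide), goA]
      simp [digraphsA, List.find?, List.isPrefixOf, J_cons, ihN,
        show ("ާ" : String).toList = ['ާ'] from by decide,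
        show ("ng" : String).toList = ['n', 'g'] from by decide]
    by_cases c3 : p = 'g' ∧ ch = 'b'
    · obtain ⟨h1, h2⟩ := c3; subst h1; subst h2
      rw [runB_some_some (show digB.get? (String.mk ['g', 'b']) = some "ߜ" from by decide), goA]
      simp [digraphsA, List.find?, List.isPrefixOf, J_cons, ihN,
        show ("ߜ" : String).toList = ['ߜ'] from by decide,
        show ("gb" : String).toList = ['g', 'b'] from by decide]
    by_cases c4 : p = 'c' ∧ ch = 'h'
    · obtain ⟨h1, h2⟩ := c4; subst h1; subst h2
      rw [runB_some_some (show digB.get? (String.mk ['c', 'h']) = some "ߗ" from by decide), goA]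
      simp [digraphsA, List.find?, List.isPrefixOf, J_cons, ihN,
        show ("ߗ" : String).toList = ['ߗ'] from by decide,
        show ("ch" : String).toList = ['c', 'h'] from by decide]
    by_cases c5 : p = 'd' ∧ ch = 'j'
    · obtain ⟨h1, h2⟩ := c5; subst h1; subst h2
      rw [runB_some_some (show digB.get? (String.mk ['d', 'j']) = some "ߖ" from by decide), goA]
      simp [digraphsA, List.find?, List.isPrefixOf, J_cons, ihN,
        show ("ߖ" : String).toList = ['ߖ'] from by decide,
        show ("dj" : String).toList = ['d', 'j'] from by decide]
    by_cases c6 : p = 's' ∧ ch = 'h'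
    · obtain ⟨h1, h2⟩ := c6; subst h1; subst h2
      rw [runB_some_some (show digB.get? (String.mk ['s', 'h']) = some "ߛ" from by decide), goA]
      simp [digraphsA, List.find?, List.isPrefixOf, J_cons, ihN,
        show ("ߛ" : String).toList = ['ߛ'] from by decide,
        show ("sh" : String).toList = ['s', 'h'] from by decide]
    -- no digraph matches: A emits p's single and restarts at ch; B does the same
    have hfindA : digraphsA.find? (fun q => q.1.toList.isPrefixOf (p :: ch :: rest)) = none := by
      simp only [digraphsA, List.find?]
      have f1 : List.isPrefixOf ['n', 'y'] (p :: ch :: rest) = false := by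
        by_cases hpn : p = 'n'
        · subst hpn
          by_cases hcy : ch = 'y'
          · exact absurd ⟨rfl, hcy⟩ c1
          · simp [List.isPrefixOf, beq_eq_false_iff_ne.mpr (Ne.symm hcy)]
        · simp [List.isPrefixOf, beq_eq_false_iff_ne.mpr (Ne.symm hpn)]
      have f2 : List.isPrefixOf ['n', 'g'] (p :: ch :: rest) = false := by
        by_cases hpn : p = 'n'
        · subst hpn
          by_cases hcy : ch = 'g'
          · exact absurd ⟨rfl, hcy⟩ c2
          · simp [List.isPrefixOf, beq_eq_false_iff_ne.mpr (Ne.symm hcy)]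
        · simp [List.isPrefixOf, beq_eq_false_iff_ne.mpr (Ne.symm hpn)]
      have f3 : List.isPrefixOf ['g', 'b'] (p :: ch :: rest) = false := by
        by_cases hpn : p = 'g'
        · subst hpn
          by_cases hcy : ch = 'b'
          · exact absurd ⟨rfl, hcy⟩ c3
          · simp [List.isPrefixOf, beq_eq_false_iff_ne.mpr (Ne.symm hcy)]
        · simp [List.isPrefixOf, beq_eq_false_iff_ne.mpr (Ne.symm hpn)]
      have f4 : List.isPrefixOf ['c', 'h'] (p :: ch :: rest) = false := by
        by_cases hpn : p = 'c'
        · subst hpn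
          by_cases hcy : ch = 'h'
          · exact absurd ⟨rfl, hcy⟩ c4
          · simp [List.isPrefixOf, beq_eq_false_iff_ne.mpr (Ne.symm hcy)]
        · simp [List.isPrefixOf, beq_eq_false_iff_ne.mpr (Ne.symm hpn)]
      have f5 : List.isPrefixOf ['d', 'j'] (p :: ch :: rest) = false := by
        by_cases hpn : p = 'd'
        · subst hpn
          by_cases hcy : ch = 'j'
          · exact absurd ⟨rfl, hcy⟩ c5
          · simp [List.isPrefixOf, beq_eq_false_iff_ne.mpr (Ne.symm hcy)]
        · simp [List.isPrefixOf, beq_eq_false_iff_ne.mpr (Ne.symm hpn)]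
      have f6 : List.isPrefixOf ['s', 'h'] (p :: ch :: rest) = false := by
        by_cases hpn : p = 's'
        · subst hpn
          by_cases hcy : ch = 'h'
          · exact absurd ⟨rfl, hcy⟩ c6
          · simp [List.isPrefixOf, beq_eq_false_iff_ne.mpr (Ne.symm hcy)]
        · simp [List.isPrefixOf, beq_eq_false_iff_ne.mpr (Ne.symm hpn)]
      simp [f1, f2, f3, f4, f5, f6]
    have hdg : digB.get? (String.mk [p, ch]) = none := by
      rw [digB_get]; simp [c1, c2, c3, c4, c5, c6]
    rw [runB_some_none hdg, goA]
    clear hdg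
    simp only [hpsp, if_false, hfindA]
    have hrunN : J (if PySem.Set.contains startersB ch then runB (some ch) rest
        else singleB.getD ch "" :: runB none rest) = J (goA (ch :: rest)) := by
      by_cases hs : PySem.Set.contains startersB ch
      · simp only [hs, if_true]
        exact ihS ch hs
      · simp only [hs, if_false, Bool.false_eq_true]
        rw [← hN]
        conv_rhs => rw [runB]
        have hmem : ch ∉ startersB := by simpa using hs
        simp [hs, hmem]
    rw [J_cons, hrunN, single_agree p]
    cases hf : fmapA.get? p with
    | some v => simp [J_cons]
    | none =>
      have hpstart := (starters_iff p).mp hp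
      rcases hpstart with h | h | h | h | h <;> subst h <;>
        first
          | exact absurd hf (by decide)
          | simp [J_cons, show ("ߗ" : String).toList = ['ߗ'] from by decide]

lemma mk_toList (s : String) : String.mk s.toList = s := String.ofList_eq.mpr rfl

lemma join_nil_sep (xs : List (List Char)) : PySem.Chars.join [] xs = xs.flatten := by
  induction xs with
  | nil => simp [PySem.Chars.join, List.intercalate]
  | cons x l ih =>
    cases l with
    | nil => simp [PySem.Chars.join, List.intercalate]
    | cons y m => rw [PySem.Chars.join_cons_cons]; simp_all

lemma joinEmpty (parts : List String) : PySem.Str.join "" parts = String.mk (J parts) := by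
  have h2 : (PySem.Str.join "" parts).toList = J parts := by
    rw [PySem.Str.toList_join, show ("" : String).toList = [] from by decide, join_nil_sep]
    rfl
  rw [← mk_toList (PySem.Str.join "" parts), h2]

-- ===== VERDICT (by name: the statement is the Claim_ definition above) =====
theorem fallback_bridge_py_spec : Claim_equal_fallback_bridge_py := by
  intro text _
  unfold Spec_fallback_bridge_py fallback_bridge_py fallback_bridge_py_alt
  rw [foldl_stepB]
  rw [joinEmpty, joinEmpty, List.nil_append, (run_eq_goA _).1]
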